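-- pv_equiv track=rewrite | github.com/HavenTong/CEGE | preprocess.py | get_label_seq
-- ===== SOURCE A (Python) =====
-- def get_label_seq(full, abbr):
--     label = [0] * len(full)
--     idx = 0
--     if len(abbr) == 0:
--         return label
--     for i, ch in enumerate(full):
--         if ch == abbr[idx]:
--             label[i] = 1
--             idx += 1
--             if idx == len(abbr):
--                 break
--     return label
-- ===== SOURCE B (Python) =====
-- def get_label_seq(full, abbr):
--     label = [0] * len(full)
--     start = 0
--     for ch in abbr:
--         pos = full.find(ch, start)
--         if pos == -1:
--             break
--         label[pos] = 1
--         start = pos + 1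
--     return label
-- ===== Notes on version B (the rewrite author's own statement) =====
-- stated objective: idiomatic
-- what changed: B iterates over abbr and jumps with str.find(ch, start) instead of A's char-by-char scan over full with a running abbr index and break.
import Mathlib
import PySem

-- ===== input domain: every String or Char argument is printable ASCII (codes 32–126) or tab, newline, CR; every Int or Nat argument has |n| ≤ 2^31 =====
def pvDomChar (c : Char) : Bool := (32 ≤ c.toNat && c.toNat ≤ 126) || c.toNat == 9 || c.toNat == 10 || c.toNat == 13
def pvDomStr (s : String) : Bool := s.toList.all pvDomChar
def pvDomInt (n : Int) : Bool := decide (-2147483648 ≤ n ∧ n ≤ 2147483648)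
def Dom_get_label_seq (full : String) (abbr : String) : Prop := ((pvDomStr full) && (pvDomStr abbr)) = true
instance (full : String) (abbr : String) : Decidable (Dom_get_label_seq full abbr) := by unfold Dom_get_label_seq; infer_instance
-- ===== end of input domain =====

-- B drives the loop over abbr with str.find(ch, start) instead of A's char-by-char scan of full
-- with a running abbr index; same return value (objective: idiomatic).

-- ===== PORT A =====
-- A's for-loop over enumerate(full) with break, as structural recursion over the enumerated list.
-- abbr.getD idx ' ' is Python's abbr[idx]: exact here because the break keeps idx < len(abbr).
def get_label_seq_goA (abbr : List Char) : List (Int × Char) → List Int → Nat → List Int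
  | [], label, _ => label
  | (i, ch) :: rest, label, idx =>
    if ch = abbr.getD idx ' ' then
      let label' := label.set i.toNat 1
      if idx + 1 = abbr.length then label'          -- break
      else get_label_seq_goA abbr rest label' (idx + 1)
    else get_label_seq_goA abbr rest label idx

def get_label_seq (full : String) (abbr : String) : List Int :=
  let label := List.replicate full.toList.length (0 : Int)
  if abbr.toList.length = 0 then label
  else get_label_seq_goA abbr.toList (PySem.List.enumerate full.toList 0) label 0

-- ===== PORT B =====
-- B's for-loop over abbr with pos = full.find(ch, start) and break on -1.
def get_label_seq_goB (full : List Char) : List Char → List Int → Int → List Int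
  | [], label, _ => label
  | ch :: rest, label, start =>
    let pos := PySem.Chars.findFrom full [ch] start none
    if pos = -1 then label                          -- break
    else get_label_seq_goB full rest (label.set pos.toNat 1) (pos + 1)

def get_label_seq_alt (full : String) (abbr : String) : List Int :=
  get_label_seq_goB full.toList abbr.toList (List.replicate full.toList.length (0 : Int)) 0

-- ===== PRECONDITION & SPEC =====
def Spec_get_label_seq (full : String) (abbr : String) (out : List Int) : Prop := out = get_label_seq_alt full abbr
instance (full : String) (abbr : String) (out : List Int) : Decidable (Spec_get_label_seq full abbr out) := by unfold Spec_get_label_seq; infer_instance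

-- ===== CLAIM (what is proved, stated in full; the proofs are below) =====
def Claim_equal_get_label_seq : Prop := ∀ (full : String) (abbr : String), Dom_get_label_seq full abbr → Spec_get_label_seq full abbr (get_label_seq full abbr)

-- ===== LEMMAS AND PROOFS =====

-- a single-character needle is an infix iff it is a member
lemma singleton_infix_iff_mem (c : Char) (l : List Char) : [c] <:+: l ↔ c ∈ l := by
  constructor
  · rintro ⟨p, q, rfl⟩; simp
  · intro h
    obtain ⟨p, q, rfl⟩ := List.append_of_mem h
    exact ⟨p, q, by simp⟩

-- how Chars.find on a single-character needle unfolds over a cons (derived from the spec lemmas)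
lemma find_singleton_cons (x : Char) (t : List Char) (c : Char) :
    PySem.Chars.find (x :: t) [c] =
      if x = c then 0
      else if PySem.Chars.find t [c] = -1 then -1 else 1 + PySem.Chars.find t [c] := by
  by_cases hx : x = c
  · subst hx
    rw [if_pos rfl]
    have hin : [x] <:+: (x :: t) := (singleton_infix_iff_mem _ _).2 (by simp)
    have h0 : 0 ≤ PySem.Chars.find (x :: t) [x] := (PySem.Chars.find_nonneg_iff _ _).2 hin
    obtain ⟨hpre, hmin⟩ := PySem.Chars.find_spec (s := x :: t) (sub := [x]) h0
    by_contra hne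
    have hpos : 0 < (PySem.Chars.find (x :: t) [x]).toNat := by omega
    exact hmin 0 hpos (by simp only [List.drop_zero]; exact ⟨t, rfl⟩)
  · rw [if_neg hx]
    by_cases ht : c ∈ t
    · have hf0 : 0 ≤ PySem.Chars.find t [c] :=
        (PySem.Chars.find_nonneg_iff _ _).2 ((singleton_infix_iff_mem _ _).2 ht)
      have hg0 : 0 ≤ PySem.Chars.find (x :: t) [c] :=
        (PySem.Chars.find_nonneg_iff _ _).2 ((singleton_infix_iff_mem _ _).2 (List.mem_cons_of_mem _ ht))
      obtain ⟨hfp, hfm⟩ := PySem.Chars.find_spec (s := t) (sub := [c]) hf0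
      obtain ⟨hgp, hgm⟩ := PySem.Chars.find_spec (s := x :: t) (sub := [c]) hg0
      set f := PySem.Chars.find t [c] with hfdef
      set g := PySem.Chars.find (x :: t) [c] with hgdef
      rw [if_neg (by omega : f ≠ -1)]
      have hg_ne0 : g.toNat ≠ 0 := by
        intro h0
        rw [h0, List.drop_zero] at hgp
        obtain ⟨r, hr⟩ := hgp
        exact hx (by simpa using congrArg (fun l => l.headI) hr.symm)
      have h1 : [c] <+: t.drop (g.toNat - 1) := by
        have h2 : (x :: t).drop g.toNat = t.drop (g.toNat - 1) := by
          cases hgt : g.toNat with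
          | zero => exact absurd hgt hg_ne0
          | succ m => simp [List.drop_succ_cons]
        rwa [h2] at hgp
      have h2 : ¬ (g.toNat - 1 < f.toNat) := fun hlt => hfm _ hlt h1
      have h3 : ¬ (f.toNat + 1 < g.toNat) := by
        intro hlt
        exact hgm (f.toNat + 1) hlt (by rw [List.drop_succ_cons]; exact hfp)
      omega
    · rw [if_pos ((PySem.Chars.find_eq_neg_one_iff _ _).2
        (by rw [singleton_infix_iff_mem]; exact ht))]
      exact (PySem.Chars.find_eq_neg_one_iff _ _).2 (by
        rw [singleton_infix_iff_mem]
        simp only [List.mem_cons, not_or]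
        exact ⟨fun h => hx h.symm, ht⟩)

-- find(ch, start) at start = length is -1
lemma findFrom_length (l : List Char) (c : Char) :
    PySem.Chars.findFrom l [c] (l.length : Int) none = -1 := by
  rw [PySem.Chars.findFrom_natCast_eq_neg_one_iff l [c] l.length le_rfl]
  rw [List.drop_length, singleton_infix_iff_mem]
  simp

-- find(ch, start) hits start when l[start] = c
lemma findFrom_at_hit (l : List Char) (c : Char) (s : Nat) (hs : s < l.length) (h : l[s] = c) :
    PySem.Chars.findFrom l [c] (s : Int) none = (s : Int) := by
  rw [PySem.Chars.findFrom_natCast l [c] s (le_of_lt hs)]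
  rw [List.drop_eq_getElem_cons hs, h, find_singleton_cons, if_pos rfl]
  norm_num

-- find(ch, start) skips a mismatching character
lemma findFrom_skip (l : List Char) (c : Char) (s : Nat) (hs : s < l.length) (h : l[s] ≠ c) :
    PySem.Chars.findFrom l [c] (s : Int) none = PySem.Chars.findFrom l [c] ((s : Int) + 1) none := by
  have hcast : (s : Int) + 1 = ((s + 1 : Nat) : Int) := by push_cast; ring
  rw [hcast, PySem.Chars.findFrom_natCast l [c] s (le_of_lt hs),
    PySem.Chars.findFrom_natCast l [c] (s + 1) (by omega)]
  rw [List.drop_eq_getElem_cons hs, find_singleton_cons, if_neg h]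
  set f := PySem.Chars.find (List.drop (s + 1) l) [c] with hf
  have hge := PySem.Chars.neg_one_le_find (List.drop (s + 1) l) [c]
  by_cases hf1 : f = -1
  · simp [hf1]
  · rw [if_neg hf1, if_neg (by omega : (1 : Int) + f ≠ -1), if_neg hf1]
    push_cast
    ring

-- B's loop returns the label unchanged once start has reached the end of full
lemma key_base (fl abbr : List Char) (idx : Nat) (label : List Int) (hidx : idx < abbr.length) :
    get_label_seq_goB fl (abbr.drop idx) label (fl.length : Int) = label := by
  rw [List.drop_eq_getElem_cons hidx]
  simp [get_label_seq_goB, findFrom_length]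

-- main invariant: A's scan of the suffix of full from s equals B's find-driven loop from start = s
lemma goA_eq_goB (fl abbr : List Char) :
    ∀ (n s idx : Nat) (label : List Int), fl.length - s ≤ n → s ≤ fl.length → idx < abbr.length →
    get_label_seq_goA abbr (PySem.List.enumerate (fl.drop s) (s : Int)) label idx =
      get_label_seq_goB fl (abbr.drop idx) label (s : Int) := by
  intro n
  induction n with
  | zero =>
    intro s idx label hle hs hidx
    have hsl : s = fl.length := by omega
    subst hsl
    rw [List.drop_length]
    simp [PySem.List.enumerate_nil, get_label_seq_goA]
    exact (key_base fl abbr idx label hidx).symm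
  | succ n ih =>
    intro s idx label hle hs hidx
    by_cases hlt : s < fl.length
    · have hcast : (s : Int) + 1 = ((s + 1 : Nat) : Int) := by push_cast; ring
      rw [List.drop_eq_getElem_cons hlt, PySem.List.enumerate_cons]
      by_cases hc : fl[s] = abbr[idx]
      · rw [List.drop_eq_getElem_cons hidx]
        simp only [get_label_seq_goA]
        rw [List.getD_eq_getElem abbr ' ' hidx, if_pos hc]
        simp only [get_label_seq_goB]
        rw [findFrom_at_hit fl abbr[idx] s hlt hc,
          if_neg (by omega : (s : Int) ≠ -1), Int.toNat_natCast]
        by_cases hb : idx + 1 = abbr.length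
        · rw [if_pos hb, show abbr.drop (idx + 1) = [] from by rw [hb, List.drop_length]]
          simp [get_label_seq_goB]
        · rw [if_neg hb, hcast]
          exact ih (s + 1) (idx + 1) _ (by omega) (by omega) (by omega)
      · simp only [get_label_seq_goA]
        rw [List.getD_eq_getElem abbr ' ' hidx, if_neg hc, hcast,
          ih (s + 1) idx label (by omega) (by omega) hidx]
        rw [List.drop_eq_getElem_cons hidx]
        simp only [get_label_seq_goB]
        rw [findFrom_skip fl abbr[idx] s hlt hc, hcast]
    · have hsl : s = fl.length := by omega
      subst hsl
      rw [List.drop_length]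
      simp [PySem.List.enumerate_nil, get_label_seq_goA]
      exact (key_base fl abbr idx label hidx).symm

-- ===== VERDICT (by name: the statement is the Claim_ definition above) =====
theorem get_label_seq_spec : Claim_equal_get_label_seq := by
  unfold Claim_equal_get_label_seq
  intro full abbr _
  show get_label_seq full abbr = get_label_seq_alt full abbr
  unfold get_label_seq get_label_seq_alt
  by_cases h : abbr.toList.length = 0
  · rw [List.length_eq_zero_iff.mp h]
    simp [get_label_seq_goB]
  · simp only [if_neg h]
    have h0 : 0 < abbr.toList.length := Nat.pos_of_ne_zero h
    have hmain := goA_eq_goB full.toList abbr.toList full.toList.length 0 0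
      (List.replicate full.toList.length 0) (by omega) (by omega) h0
    simpa using hmain
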